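-- pv_equiv track=rewrite | github.com/NomusBoxes/Valma | MakeItCake/PicSendV2.5/image_utils.py | find_inverted_path
-- ===== SOURCE A (Python) =====
-- def find_inverted_path(points, start_index):
--     """
--     Находит и возвращает индекс, где начинается инвертированный путь, начиная с start_index.
--     Если инвертированный путь не найден, возвращает None.
--     """
--     for i in range(start_index + 1, len(points)):
--         if points[i] == points[start_index]:
--             # Возможное начало инвертированного пути найдено
--             j, k = start_index, i
--             while j >= 0 and k < len(points) and points[j] == points[k]:
--                 j -= 1
--                 k += 1
--             # Если j достигает -1, это означает, что мы нашли полный инвертированный путь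
--             if j == -1:
--                 return i
--     return None
-- ===== SOURCE B (Python) =====
-- def find_inverted_path(points, start_index):
--     # Search for the reversed prefix points[start_index..0] as a pattern:
--     # precompute it once, then return the first window equal to it, cheaply
--     # pre-filtering candidates on the pattern's first element.
--     rev = points[:start_index + 1]
--     rev.reverse()
--     n = len(points)
--     for i in range(start_index + 1, n):
--         if points[i] == rev[0] and points[i:i + len(rev)] == rev:
--             return i
--     return None
-- ===== Notes on version B (the rewrite author's own statement) =====
-- stated objective: alternative
-- what changed: A re-runs a two-pointer expand-and-compare loop (j down from start_index, k up from each candidate) for every candidate position; B precomputes the reversed prefix once as a pattern and returns the first window whose slice equals it, pre-filtering on the pattern's first element.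
-- outside the precondition, e.g. on find_inverted_path([2, 1], -1): A returns 1, B raises IndexError
import Mathlib
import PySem

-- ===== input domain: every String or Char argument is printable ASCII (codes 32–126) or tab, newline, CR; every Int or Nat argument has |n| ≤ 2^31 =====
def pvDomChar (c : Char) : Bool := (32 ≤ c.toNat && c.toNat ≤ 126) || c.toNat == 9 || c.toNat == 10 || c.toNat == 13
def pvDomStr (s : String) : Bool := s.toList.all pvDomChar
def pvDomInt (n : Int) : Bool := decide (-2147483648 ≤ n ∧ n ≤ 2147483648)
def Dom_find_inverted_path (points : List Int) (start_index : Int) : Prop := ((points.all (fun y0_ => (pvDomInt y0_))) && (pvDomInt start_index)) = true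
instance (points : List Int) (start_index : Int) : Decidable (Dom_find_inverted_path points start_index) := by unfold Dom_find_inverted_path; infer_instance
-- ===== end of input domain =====

-- B replaces A's per-candidate two-pointer expand loop with a precomputed reversed-prefix
-- pattern compared by slicing (alternative decomposition, same return value on Pre_).

-- ===== PORT A =====
-- the while loop 'while j >= 0 and k < len(points) and points[j] == points[k]: j -= 1; k += 1'.
-- Fuel start_index.toNat + 1 bounds the iteration count exactly (j decreases from start_index
-- to -1), so the fuelled loop returns the same final j as Python's unbounded while.
def pvA_while (points : List Int) : Nat → Int → Int → Int
  | 0, j, _ => j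
  | fuel + 1, j, k =>
      if j ≥ 0 ∧ k < (points.length : Int) ∧
          PySem.List.pyGetD points j 0 = PySem.List.pyGetD points k 0 then
        pvA_while points fuel (j - 1) (k + 1)
      else j

-- the for loop over range(start_index + 1, len(points)) with its early return
def pvA_scan (points : List Int) (start_index : Int) : List Int → Option Int
  | [] => none
  | i :: rest =>
      if PySem.List.pyGetD points i 0 = PySem.List.pyGetD points start_index 0 then
        if pvA_while points (start_index.toNat + 1) start_index i = -1 then some i
        else pvA_scan points start_index rest
      else pvA_scan points start_index rest

def find_inverted_path (points : List Int) (start_index : Int) : Option Int :=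
  pvA_scan points start_index (PySem.List.pyRange (start_index + 1) (points.length : Int) 1)

-- ===== PORT B =====
-- for i in range(start_index+1, n): if points[i] == rev[0] and points[i:i+len(rev)] == rev: return i
def pvB_scan (points rev : List Int) : List Int → Option Int
  | [] => none
  | i :: rest =>
      if PySem.List.pyGetD points i 0 = PySem.List.pyGetD rev 0 0 ∧
          PySem.List.slice points (some i) (some (i + (rev.length : Int))) = rev then some i
      else pvB_scan points rev rest

def find_inverted_path_alt (points : List Int) (start_index : Int) : Option Int :=
  let rev := (PySem.List.slice points none (some (start_index + 1))).reverse
  pvB_scan points rev (PySem.List.pyRange (start_index + 1) (points.length : Int) 1)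

-- ===== PRECONDITION & SPEC =====
-- Pre_ restricts to the function's natural domain of a non-negative start index: for negative
-- start_index Python's negative-index wraparound makes A return accidental values (or raise
-- IndexError below -len(points)), outside the task's natural domain.
def Pre_find_inverted_path (points : List Int) (start_index : Int) : Prop := 0 ≤ start_index
instance (points : List Int) (start_index : Int) : Decidable (Pre_find_inverted_path points start_index) := by unfold Pre_find_inverted_path; infer_instance
def pvWitness_find_inverted_path : List Int × Int := ([1, 2, 1, 2, 1], 0)

def Spec_find_inverted_path (points : List Int) (start_index : Int) (out : Option Int) : Prop := out = find_inverted_path_alt points start_index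
instance (points : List Int) (start_index : Int) (out : Option Int) : Decidable (Spec_find_inverted_path points start_index out) := by unfold Spec_find_inverted_path; infer_instance

-- ===== CLAIM (what is proved, stated in full; the proofs are below) =====
def Claim_equal_find_inverted_path : Prop := ∀ (points : List Int) (start_index : Int), Dom_find_inverted_path points start_index → Pre_find_inverted_path points start_index → Spec_find_inverted_path points start_index (find_inverted_path points start_index)

-- ===== LEMMAS AND PROOFS =====

theorem pvA_while_neg (points : List Int) (fuel : Nat) (j k : Int) (hj : j < 0) :
    pvA_while points fuel j k = j := by
  cases fuel with
  | zero => rfl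
  | succ f => simp only [pvA_while]; rw [if_neg]; rintro ⟨h0, -⟩; omega

-- characterization of the while loop: it ends with j = -1 iff the whole reversed prefix fits
-- and matches element-wise
theorem pvA_while_char (points : List Int) :
    ∀ (jn : Nat) (fuel kn : Nat), jn < points.length → jn < fuel →
      (pvA_while points fuel (jn : Int) (kn : Int) = -1 ↔
        (kn + jn < points.length ∧
          ∀ t : Nat, t ≤ jn → points.getD (jn - t) 0 = points.getD (kn + t) 0)) := by
  intro jn
  induction jn with
  | zero =>
      intro fuel kn hlt hfuel
      obtain ⟨f, rfl⟩ : ∃ f, fuel = f + 1 := ⟨fuel - 1, by omega⟩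
      simp only [pvA_while]
      by_cases hk : (kn : Int) < (points.length : Int)
      · by_cases he : PySem.List.pyGetD points ((0 : Nat) : Int) 0 = PySem.List.pyGetD points ((kn : Nat) : Int) 0
        · rw [if_pos ⟨by positivity, hk, he⟩]
          rw [pvA_while_neg points f _ _ (by norm_num)]
          simp only [PySem.List.pyGetD_natCast] at he
          constructor
          · intro _
            refine ⟨by exact_mod_cast hk, ?_⟩
            intro t ht
            interval_cases t
            simpa using he
          · intro _; norm_num
        · rw [if_neg (by rintro ⟨-, -, h⟩; exact he h)]
          constructor
          · intro h; norm_num at h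
          · rintro ⟨-, hall⟩
            exact absurd (by
              have := hall 0 (by omega)
              simp only [Nat.sub_zero, Nat.add_zero] at this
              rw [PySem.List.pyGetD_natCast, PySem.List.pyGetD_natCast]
              simpa using this) he
      · rw [if_neg (by rintro ⟨-, h, -⟩; exact hk h)]
        constructor
        · intro h; norm_num at h
        · rintro ⟨hlen, -⟩
          exfalso; exact hk (by exact_mod_cast hlen)
  | succ m ih =>
      intro fuel kn hlt hfuel
      obtain ⟨f, rfl⟩ : ∃ f, fuel = f + 1 := ⟨fuel - 1, by omega⟩
      simp only [pvA_while]
      by_cases hk : (kn : Int) < (points.length : Int)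
      · by_cases he : PySem.List.pyGetD points ((m + 1 : Nat) : Int) 0 = PySem.List.pyGetD points ((kn : Nat) : Int) 0
        · rw [if_pos ⟨by positivity, hk, he⟩]
          have hcast1 : ((m + 1 : Nat) : Int) - 1 = ((m : Nat) : Int) := by push_cast; ring
          have hcast2 : ((kn : Nat) : Int) + 1 = ((kn + 1 : Nat) : Int) := by push_cast; ring
          rw [hcast1, hcast2, ih f (kn + 1) (by omega) (by omega)]
          simp only [PySem.List.pyGetD_natCast] at he
          constructor
          · rintro ⟨hlen, hall⟩
            refine ⟨by omega, ?_⟩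
            intro t ht
            cases t with
            | zero => simpa using he
            | succ u =>
                have := hall u (by omega)
                have h1 : m + 1 - (u + 1) = m - u := by omega
                have h2 : kn + (u + 1) = kn + 1 + u := by omega
                rw [h1, h2]; exact this
          · rintro ⟨hlen, hall⟩
            refine ⟨by omega, ?_⟩
            intro t ht
            have := hall (t + 1) (by omega)
            have h1 : m + 1 - (t + 1) = m - t := by omega
            have h2 : kn + (t + 1) = kn + 1 + t := by omega
            rw [h1, h2] at this; exact this
        · rw [if_neg (by rintro ⟨-, -, h⟩; exact he h)]
          constructor
          · intro h
            exfalso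
            have : ((m + 1 : Nat) : Int) = -1 := h
            omega
          · rintro ⟨-, hall⟩
            exact absurd (by
              have := hall 0 (by omega)
              simp only [Nat.sub_zero, Nat.add_zero] at this
              rw [PySem.List.pyGetD_natCast, PySem.List.pyGetD_natCast]
              simpa using this) he
      · rw [if_neg (by rintro ⟨-, h, -⟩; exact hk h)]
        constructor
        · intro h
          exfalso
          have : ((m + 1 : Nat) : Int) = -1 := h
          omega
        · rintro ⟨hlen, -⟩
          exfalso; exact hk (by exact_mod_cast (show (kn : Nat) < points.length by omega))

-- characterization of B's slice comparison against the reversed prefix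
theorem pvB_slice_char (points : List Int) (sn kn : Nat) (hs : sn < points.length) :
    (PySem.List.slice points (some ((kn : Nat) : Int))
        (some (((kn : Nat) : Int) + (((points.take (sn + 1)).reverse.length : Nat) : Int)))
      = (points.take (sn + 1)).reverse ↔
      (kn + sn < points.length ∧
        ∀ t : Nat, t ≤ sn → points.getD (sn - t) 0 = points.getD (kn + t) 0)) := by
  have hrevlen : (points.take (sn + 1)).reverse.length = sn + 1 := by
    simp; omega
  rw [PySem.List.slice_natCast_add]
  constructor
  · intro h
    have hlen := congrArg List.length h
    simp only [List.length_take, List.length_drop, List.length_reverse] at hlen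
    have hfit : kn + sn < points.length := by omega
    refine ⟨hfit, ?_⟩
    intro t ht
    have h1 : ((points.drop kn).take ((points.take (sn + 1)).reverse.length))[t]'(by
        simp only [List.length_take, List.length_drop]; omega) =
        ((points.take (sn + 1)).reverse)[t]'(by omega) := by
      exact List.getElem_of_eq h _
    rw [List.getElem_take, List.getElem_drop] at h1
    rw [List.getElem_reverse] at h1
    rw [List.getElem_take] at h1
    have e1 : points.getD (kn + t) 0 = points[kn + t]'(by omega) := List.getD_eq_getElem points 0 (by omega)
    have e2 : points.getD (sn - t) 0 = points[sn - t]'(by omega) := List.getD_eq_getElem points 0 (by omega)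
    rw [e1, e2, h1]
    congr 1
    simp only [List.length_take]
    omega
  · rintro ⟨hfit, hall⟩
    apply List.ext_getElem
    · simp only [List.length_take, List.length_drop, List.length_reverse]
      omega
    · intro t h1 h2
      rw [List.getElem_take, List.getElem_drop, List.getElem_reverse, List.getElem_take]
      have ht : t ≤ sn := by
        simp only [List.length_reverse, List.length_take] at h2
        omega
      have := hall t ht
      have e1 : points.getD (kn + t) 0 = points[kn + t]'(by omega) := List.getD_eq_getElem points 0 (by omega)
      have e2 : points.getD (sn - t) 0 = points[sn - t]'(by omega) := List.getD_eq_getElem points 0 (by omega)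
      rw [e1, e2] at this
      rw [← this]
      congr 1
      simp only [List.length_take]
      omega

-- the pattern's first element rev[0] is points[start_index]
theorem pv_rev_head (points : List Int) (sn : Nat) (hs : sn < points.length) :
    (points.take (sn + 1)).reverse.getD 0 0 = points.getD sn 0 := by
  have hlen : (points.take (sn + 1)).reverse.length = sn + 1 := by simp; omega
  rw [List.getD_eq_getElem _ _ (by omega), List.getD_eq_getElem _ _ hs]
  rw [List.getElem_reverse, List.getElem_take]
  congr 1
  simp only [List.length_take]
  omega

-- the two scans agree on any candidate list whose elements lie in [start_index+1, len)
theorem pv_scan_eq (points : List Int) (sn : Nat) :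
    ∀ L : List Int, (∀ i ∈ L, (sn : Int) + 1 ≤ i ∧ i < (points.length : Int)) →
      pvA_scan points (sn : Int) L = pvB_scan points ((points.take (sn + 1)).reverse) L := by
  intro L
  induction L with
  | nil => intro _; rfl
  | cons i rest ih =>
      intro hmem
      obtain ⟨hi1, hi2⟩ := hmem i (by simp)
      have hrest : ∀ x ∈ rest, (sn : Int) + 1 ≤ x ∧ x < (points.length : Int) :=
        fun x hx => hmem x (by simp [hx])
      obtain ⟨kn, rfl⟩ : ∃ kn : Nat, i = (kn : Int) := ⟨i.toNat, by omega⟩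
      have hs : sn < points.length := by omega
      have hk : kn < points.length := by exact_mod_cast hi2
      have htn : ((sn : Int)).toNat = sn := by omega
      simp only [pvA_scan, pvB_scan]
      rw [htn]
      have hwhile := pvA_while_char points sn (sn + 1) kn hs (by omega)
      have hslice := pvB_slice_char points sn kn hs
      by_cases hc : (kn + sn < points.length ∧
          ∀ t : Nat, t ≤ sn → points.getD (sn - t) 0 = points.getD (kn + t) 0)
      · have hfilter : PySem.List.pyGetD points ((kn : Nat) : Int) 0 =
            PySem.List.pyGetD points ((sn : Nat) : Int) 0 := by
          have := hc.2 0 (by omega)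
          simp only [Nat.sub_zero, Nat.add_zero] at this
          simp only [PySem.List.pyGetD_natCast]
          exact this.symm
        have hbfilter : PySem.List.pyGetD points ((kn : Nat) : Int) 0 =
            PySem.List.pyGetD ((points.take (sn + 1)).reverse) 0 0 := by
          rw [hfilter]
          simp only [PySem.List.pyGetD_natCast, PySem.List.pyGetD_zero]
          exact (pv_rev_head points sn hs).symm
        rw [if_pos hfilter, if_pos (hwhile.2 hc), if_pos ⟨hbfilter, hslice.2 hc⟩]
      · by_cases hfilter : PySem.List.pyGetD points ((kn : Nat) : Int) 0 =
            PySem.List.pyGetD points ((sn : Nat) : Int) 0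
        · rw [if_pos hfilter, if_neg (fun h => hc (hwhile.1 h)),
            if_neg (fun h : _ ∧ _ => hc (hslice.1 h.2))]
          exact ih hrest
        · rw [if_neg hfilter, if_neg (fun h : _ ∧ _ => hc (hslice.1 h.2))]
          exact ih hrest

-- ===== VERDICT (by name: the statement is the Claim_ definition above) =====
theorem find_inverted_path_spec : Claim_equal_find_inverted_path := by
  intro points start_index _ hpre
  unfold Spec_find_inverted_path find_inverted_path find_inverted_path_alt
  obtain ⟨sn, rfl⟩ : ∃ sn : Nat, start_index = (sn : Int) := ⟨start_index.toNat, by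
    have : (0 : Int) ≤ start_index := hpre
    omega⟩
  have hrev : (PySem.List.slice points none (some ((sn : Int) + 1))).reverse =
      (points.take (sn + 1)).reverse := by
    have : ((sn : Int) + 1) = ((sn + 1 : Nat) : Int) := by push_cast; ring
    rw [this, PySem.List.slice_to_natCast]
  rw [hrev]
  exact pv_scan_eq points sn _ (fun i hi => (PySem.List.mem_pyRange_one.1 hi))
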